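-- pv_equiv track=rewrite | github.com/jiacheng-xu/lattice-generation | src/recomb_proto.py | find_suffix
-- ===== SOURCE A (Python) =====
-- def find_suffix(seq_a, seq_b):
--     pointer_a, pointer_b = len(seq_a)-1, len(seq_b) - 1
--     while pointer_a >= 0 and pointer_b >= 0:
--         a = seq_a[pointer_a]
--         b = seq_b[pointer_b]
--         if a != b:
--             return [pointer_a, pointer_b]
--         else:
--             pointer_a -= 1
--             pointer_b -= 1
--     return [pointer_a, pointer_b]
-- ===== SOURCE B (Python) =====
-- def find_suffix(seq_a, seq_b):
--     # Binary search the longest common suffix length: "last k elements equal"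
--     # is monotone in k, so find the largest k for which the k-suffixes match.
--     lo, hi = 0, min(len(seq_a), len(seq_b))
--     while lo < hi:
--         mid = (lo + hi + 1) // 2
--         if seq_a[len(seq_a) - mid:] == seq_b[len(seq_b) - mid:]:
--             lo = mid
--         else:
--             hi = mid - 1
--     return [len(seq_a) - 1 - lo, len(seq_b) - 1 - lo]
-- ===== Notes on version B (the rewrite author's own statement) =====
-- stated objective: alternative
-- what changed: Replaces A's element-by-element backward two-pointer scan by a binary search for the longest common suffix length (the predicate 'last k elements equal' is monotone), then reconstructs both indices arithmetically.
import Mathlib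
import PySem

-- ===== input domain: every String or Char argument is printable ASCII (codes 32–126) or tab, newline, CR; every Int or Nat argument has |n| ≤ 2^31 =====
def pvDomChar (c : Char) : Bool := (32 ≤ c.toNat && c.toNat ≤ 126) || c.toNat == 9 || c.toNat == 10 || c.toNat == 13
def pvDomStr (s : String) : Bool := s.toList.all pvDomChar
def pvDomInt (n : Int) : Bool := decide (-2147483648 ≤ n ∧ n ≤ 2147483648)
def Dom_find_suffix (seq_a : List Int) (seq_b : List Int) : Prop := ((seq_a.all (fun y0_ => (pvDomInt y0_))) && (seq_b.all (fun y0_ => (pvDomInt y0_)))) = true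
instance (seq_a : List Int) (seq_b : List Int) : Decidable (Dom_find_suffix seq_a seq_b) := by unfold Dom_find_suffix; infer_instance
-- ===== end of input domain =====

-- B replaces A's element-by-element backward two-pointer scan by a binary search for the
-- longest common suffix length (slice comparison as the monotone predicate): a genuinely
-- different algorithm of similar cost ("alternative", not claimed faster).


-- ===== PORT A =====
-- A's while-loop; pointers only ever move within range, so the `.getD 0` default of the
-- index reads is never taken (pa starts at len-1 and only decreases while ≥ 0).
def find_suffix_loop (seq_a : List Int) (seq_b : List Int) (pa pb : Int) : List Int :=
  if h : 0 ≤ pa ∧ 0 ≤ pb then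
    let a := (PySem.List.pyGet? seq_a pa).getD 0
    let b := (PySem.List.pyGet? seq_b pb).getD 0
    if a ≠ b then [pa, pb]
    else find_suffix_loop seq_a seq_b (pa - 1) (pb - 1)
  else [pa, pb]
termination_by (pa + 1).toNat
decreasing_by omega

def find_suffix (seq_a : List Int) (seq_b : List Int) : List Int :=
  find_suffix_loop seq_a seq_b ((seq_a.length : Int) - 1) ((seq_b.length : Int) - 1)

-- ===== PORT B =====
-- B's while-loop: binary search for the largest k with seq_a[len_a-k:] == seq_b[len_b-k:].
-- lo and hi are always nonnegative Python ints, ported as Nat; (lo+hi+1)//2 is Nat division.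
-- The slice seq_a[len_a-mid:] has a start index in [0, len_a] (mid ≤ hi ≤ min of lengths),
-- where Python slicing is exactly List.drop.
def find_suffix_bsearch (seq_a : List Int) (seq_b : List Int) (lo hi : Nat) : Nat :=
  if lo < hi then
    let mid := (lo + hi + 1) / 2
    if seq_a.drop (seq_a.length - mid) == seq_b.drop (seq_b.length - mid) then
      find_suffix_bsearch seq_a seq_b mid hi
    else
      find_suffix_bsearch seq_a seq_b lo (mid - 1)
  else lo
termination_by hi - lo
decreasing_by all_goals omega

def find_suffix_alt (seq_a : List Int) (seq_b : List Int) : List Int :=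
  let lo := find_suffix_bsearch seq_a seq_b 0 (min seq_a.length seq_b.length)
  [(seq_a.length : Int) - 1 - lo, (seq_b.length : Int) - 1 - lo]

-- ===== PRECONDITION & SPEC =====
def Spec_find_suffix (seq_a : List Int) (seq_b : List Int) (out : List Int) : Prop := out = find_suffix_alt seq_a seq_b
instance (seq_a : List Int) (seq_b : List Int) (out : List Int) : Decidable (Spec_find_suffix seq_a seq_b out) := by unfold Spec_find_suffix; infer_instance

-- ===== CLAIM (what is proved, stated in full; the proofs are below) =====
def Claim_equal_find_suffix : Prop := ∀ (seq_a : List Int) (seq_b : List Int), Dom_find_suffix seq_a seq_b → Spec_find_suffix seq_a seq_b (find_suffix seq_a seq_b)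

-- ===== LEMMAS AND PROOFS =====

-- proof-side yardstick: length of the common prefix of a zipped pair list
def matchLen : List (Int × Int) → Nat
  | [] => 0
  | (a, b) :: rest => if a = b then matchLen rest + 1 else 0

lemma matchLen_le_length : ∀ (l : List (Int × Int)), matchLen l ≤ l.length
  | [] => by simp [matchLen]
  | (a, b) :: rest => by
      simp only [matchLen, List.length_cons]
      split_ifs
      · exact Nat.succ_le_succ (matchLen_le_length rest)
      · omega

lemma take_eq_iff_le_matchLen :
    ∀ (k : Nat) (xs ys : List Int), k ≤ xs.length → k ≤ ys.length →
      (xs.take k = ys.take k ↔ k ≤ matchLen (xs.zip ys)) := by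
  intro k
  induction k with
  | zero => intro xs ys _ _; simp
  | succ k ih =>
    intro xs ys hx hy
    match xs, ys with
    | x :: xs', y :: ys' =>
      simp only [List.take_succ_cons, List.zip_cons_cons, matchLen, List.cons.injEq]
      by_cases hxy : x = y
      · rw [if_pos hxy, ih xs' ys' (by simpa using hx) (by simpa using hy)]
        omega
      · rw [if_neg hxy]
        constructor
        · rintro ⟨h, -⟩; exact absurd h hxy
        · omega

-- "the last k elements agree" rephrased as a bound on matchLen of the zipped reverses
lemma drop_eq_iff_le_matchLen (seq_a seq_b : List Int) (k : Nat)
    (ha : k ≤ seq_a.length) (hb : k ≤ seq_b.length) :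
    (seq_a.drop (seq_a.length - k) = seq_b.drop (seq_b.length - k) ↔
      k ≤ matchLen (seq_a.reverse.zip seq_b.reverse)) := by
  have hda : seq_a.drop (seq_a.length - k) = (seq_a.reverse.take k).reverse := by
    rw [← List.reverse_reverse (List.drop (seq_a.length - k) seq_a), List.reverse_drop]
    congr 2
    omega
  have hdb : seq_b.drop (seq_b.length - k) = (seq_b.reverse.take k).reverse := by
    rw [← List.reverse_reverse (List.drop (seq_b.length - k) seq_b), List.reverse_drop]
    congr 2
    omega
  rw [hda, hdb, List.reverse_inj]
  exact take_eq_iff_le_matchLen k seq_a.reverse seq_b.reverse (by simpa) (by simpa)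

lemma bsearch_eq (seq_a seq_b : List Int) :
    ∀ (n lo hi : Nat), hi - lo ≤ n → hi ≤ min seq_a.length seq_b.length →
      lo ≤ matchLen (seq_a.reverse.zip seq_b.reverse) →
      matchLen (seq_a.reverse.zip seq_b.reverse) ≤ hi →
      find_suffix_bsearch seq_a seq_b lo hi = matchLen (seq_a.reverse.zip seq_b.reverse) := by
  intro n
  induction n with
  | zero =>
    intro lo hi hfuel hmin hlo hhi
    rw [find_suffix_bsearch, if_neg (by omega)]
    omega
  | succ n ih =>
    intro lo hi hfuel hmin hlo hhi
    by_cases hlt : lo < hi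
    · rw [find_suffix_bsearch, if_pos hlt]
      have hmid1 : lo < (lo + hi + 1) / 2 := by omega
      have hmid2 : (lo + hi + 1) / 2 ≤ hi := by omega
      have hcond := drop_eq_iff_le_matchLen seq_a seq_b ((lo + hi + 1) / 2)
        (by omega) (by omega)
      by_cases hc : seq_a.drop (seq_a.length - (lo + hi + 1) / 2)
          = seq_b.drop (seq_b.length - (lo + hi + 1) / 2)
      · simp only [hc, beq_self_eq_true, if_true]
        exact ih ((lo + hi + 1) / 2) hi (by omega) hmin (hcond.mp hc) hhi
      · rw [if_neg (by simpa using hc)]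
        have : ¬ ((lo + hi + 1) / 2 ≤ matchLen (seq_a.reverse.zip seq_b.reverse)) :=
          fun h => hc (hcond.mpr h)
        exact ih lo ((lo + hi + 1) / 2 - 1) (by omega) (by omega) hlo (by omega)
    · rw [find_suffix_bsearch, if_neg hlt]
      omega

-- A's loop computes the same pointers, expressed through matchLen of the remaining zip
lemma find_suffix_loop_eq (seq_a seq_b : List Int) :
    ∀ (n k : Nat), seq_a.length - k ≤ n →
      find_suffix_loop seq_a seq_b ((seq_a.length : Int) - 1 - k) ((seq_b.length : Int) - 1 - k)
        = [(seq_a.length : Int) - 1 - k - matchLen ((seq_a.reverse.drop k).zip (seq_b.reverse.drop k)),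
           (seq_b.length : Int) - 1 - k - matchLen ((seq_a.reverse.drop k).zip (seq_b.reverse.drop k))] := by
  intro n
  induction n with
  | zero =>
    intro k hk
    have hk' : seq_a.length ≤ k := by omega
    rw [find_suffix_loop]
    have hdrop : seq_a.reverse.drop k = [] := by
      apply List.drop_eq_nil_of_le; simpa using hk'
    simp [hdrop, matchLen]
    omega
  | succ n ih =>
    intro k hk
    by_cases hka : seq_a.length ≤ k
    · rw [find_suffix_loop]
      have hdrop : seq_a.reverse.drop k = [] := by
        apply List.drop_eq_nil_of_le; simpa using hka
      simp [hdrop, matchLen]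
      omega
    · by_cases hkb : seq_b.length ≤ k
      · rw [find_suffix_loop]
        have hdrop : seq_b.reverse.drop k = [] := by
          apply List.drop_eq_nil_of_le; simpa using hkb
        simp [hdrop, matchLen]
        omega
      · simp only [not_le] at hka hkb
        have hia : seq_a.length - 1 - k < seq_a.length := by omega
        have hib : seq_b.length - 1 - k < seq_b.length := by omega
        have hget_a : (PySem.List.pyGet? seq_a ((seq_a.length : Int) - 1 - k)).getD 0
            = seq_a.reverse[k]'(by simpa using hka) := by
          have : ((seq_a.length : Int) - 1 - k) = ((seq_a.length - 1 - k : Nat) : Int) := by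
            omega
          rw [this, PySem.List.pyGet?_natCast]
          simp [List.getElem?_eq_getElem hia, List.getElem_reverse]
        have hget_b : (PySem.List.pyGet? seq_b ((seq_b.length : Int) - 1 - k)).getD 0
            = seq_b.reverse[k]'(by simpa using hkb) := by
          have : ((seq_b.length : Int) - 1 - k) = ((seq_b.length - 1 - k : Nat) : Int) := by
            omega
          rw [this, PySem.List.pyGet?_natCast]
          simp [List.getElem?_eq_getElem hib, List.getElem_reverse]
        have hdropa : seq_a.reverse.drop k
            = seq_a.reverse[k]'(by simpa using hka) :: seq_a.reverse.drop (k + 1) := by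
          exact List.drop_eq_getElem_cons (by simpa using hka)
        have hdropb : seq_b.reverse.drop k
            = seq_b.reverse[k]'(by simpa using hkb) :: seq_b.reverse.drop (k + 1) := by
          exact List.drop_eq_getElem_cons (by simpa using hkb)
        rw [find_suffix_loop]
        rw [dif_pos (by constructor <;> omega)]
        simp only [hget_a, hget_b, hdropa, hdropb, List.zip_cons_cons, matchLen]
        by_cases heq : seq_a.reverse[k]'(by simpa using hka) = seq_b.reverse[k]'(by simpa using hkb)
        · have harg_a : (seq_a.length : Int) - 1 - k - 1 = (seq_a.length : Int) - 1 - (k + 1 : Nat) := by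
            push_cast; ring
          have harg_b : (seq_b.length : Int) - 1 - k - 1 = (seq_b.length : Int) - 1 - (k + 1 : Nat) := by
            push_cast; ring
          simp only [heq, ne_eq, not_true_eq_false, ite_false]
          rw [harg_a, harg_b, ih (k + 1) (by omega)]
          push_cast
          simp only [List.cons.injEq, and_true]
          exact ⟨by ring, by ring⟩
        · simp only [ne_eq, if_pos heq, if_neg heq]
          simp

theorem find_suffix_spec : Claim_equal_find_suffix := by
  intro seq_a seq_b _
  unfold Spec_find_suffix find_suffix find_suffix_alt
  have hM := matchLen_le_length (seq_a.reverse.zip seq_b.reverse)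
  have hMlen : matchLen (seq_a.reverse.zip seq_b.reverse) ≤ min seq_a.length seq_b.length := by
    simpa using hM
  rw [bsearch_eq seq_a seq_b (min seq_a.length seq_b.length) 0
      (min seq_a.length seq_b.length) (by omega) (le_refl _) (by omega) hMlen]
  have h0a : ((seq_a.length : Int) - 1) = ((seq_a.length : Int) - 1 - (0 : Nat)) := by push_cast; ring
  have h0b : ((seq_b.length : Int) - 1) = ((seq_b.length : Int) - 1 - (0 : Nat)) := by push_cast; ring
  rw [h0a, h0b, find_suffix_loop_eq seq_a seq_b seq_a.length 0 (by omega)]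
  simp
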